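-- pv_equiv track=rewrite | github.com/Wojti-7/logia | Zadania/logia03_zad7.py | SUMAS
-- ===== SOURCE A (Python) =====
-- def wartosc_litery(l):
--     if (l == 'a'):
--         return 0
--     if (l == 'b'):
--         return 1
--     if (l == 'c'):
--         return 2
--     if (l == 'd'):
--         return 3
--     if (l == 'e'):
--         return 4
--     if (l == 'f'):
--         return 5
--     if (l == 'g'):
--         return 6
--     if (l == 'h'):
--         return 7
--     if (l == 'i'):
--         return 8
--     if (l == 'j'):
--         return 9
--
-- def wartosc_cyfry(c):
--     if (c == '0'):
--         return 'a'
--     if (c == '1'):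
--         return 'b'
--     if (c == '2'):
--         return 'c'
--     if (c == '3'):
--         return 'd'
--     if (c == '4'):
--         return 'e'
--     if (c == '5'):
--         return 'f'
--     if (c == '6'):
--         return 'g'
--     if (c == '7'):
--         return 'h'
--     if (c =='8'):
--         return 'i'
--     if (c == '9'):
--         return 'j'
--
-- def potegi(x, y):
--     wynik = 1
--     for i in range(1, y+1, 1):
--         wynik = wynik*x
--     return wynik
--
-- def SUMAS(s1, s2):
--     suma1 = 0
--     suma2 = 0
--     suma = 0
--     wynik = ''
--     for i in range(0, len(s1), 1):
--         f = wartosc_litery(s1[i])* potegi(10, len(s1)-i-1)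
--         suma1 = suma1 + f
--     for j in range(0, len(s2), 1):
--         d = wartosc_litery(s2[j])* potegi(10, len(s2)-j-1)
--         suma2 = suma2 + d
--     suma = suma1 + suma2
--     k = str(suma)
--     for i in range(0, len(k), 1):
--         p = wartosc_cyfry(k[i])
--         wynik = wynik + p
--     return wynik
-- ===== SOURCE B (Python) =====
-- ALPHABET = "abcdefghij"
--
-- def SUMAS(s1, s2):
--     n1 = 0
--     for c in s1:
--         n1 = 10 * n1 + ALPHABET.index(c)
--     n2 = 0
--     for c in s2:
--         n2 = 10 * n2 + ALPHABET.index(c)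
--     return ''.join(ALPHABET[ord(d) - 48] for d in str(n1 + n2))
-- ===== Notes on version B (the rewrite author's own statement) =====
-- stated objective: faster
-- what changed: B parses each string with Horner's running accumulator over the alphabet position (ALPHABET.index) instead of A's per-index power loop (potegi) and letter if-chain, and re-encodes each digit by indexing the same alphabet instead of A's digit if-chain.
import Mathlib
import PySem

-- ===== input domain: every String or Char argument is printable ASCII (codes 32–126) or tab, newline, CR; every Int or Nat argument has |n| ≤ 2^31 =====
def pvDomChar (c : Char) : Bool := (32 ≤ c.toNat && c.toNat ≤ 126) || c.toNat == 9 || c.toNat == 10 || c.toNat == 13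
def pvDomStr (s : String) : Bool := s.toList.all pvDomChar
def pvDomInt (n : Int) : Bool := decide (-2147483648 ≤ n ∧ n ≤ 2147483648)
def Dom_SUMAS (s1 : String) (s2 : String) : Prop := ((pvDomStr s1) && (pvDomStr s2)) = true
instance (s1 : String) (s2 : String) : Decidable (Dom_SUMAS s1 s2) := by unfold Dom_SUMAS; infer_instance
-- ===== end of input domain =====

-- B parses with Horner's running accumulator over alphabet positions and re-encodes by
-- indexing the same alphabet: objective 'faster' (A recomputes a power per index).

-- ===== PORT A =====
-- Python returns None outside 'a'..'j' and the caller then raises TypeError (None * int);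
-- those inputs are excluded by Pre_SUMAS, the final 0 is a placeholder for that dead branch.
def wartosc_litery (l : Char) : Int :=
  if l = 'a' then 0
  else if l = 'b' then 1
  else if l = 'c' then 2
  else if l = 'd' then 3
  else if l = 'e' then 4
  else if l = 'f' then 5
  else if l = 'g' then 6
  else if l = 'h' then 7
  else if l = 'i' then 8
  else if l = 'j' then 9
  else 0

-- Python returns None outside '0'..'9'; A only applies it to characters of str(suma),
-- which are digits, so the final 'a' placeholder is never reached on Pre_SUMAS.
def wartosc_cyfry (c : Char) : Char :=
  if c = '0' then 'a'
  else if c = '1' then 'b'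
  else if c = '2' then 'c'
  else if c = '3' then 'd'
  else if c = '4' then 'e'
  else if c = '5' then 'f'
  else if c = '6' then 'g'
  else if c = '7' then 'h'
  else if c = '8' then 'i'
  else if c = '9' then 'j'
  else 'a'

def potegi (x : Int) (y : Int) : Int :=
  (PySem.List.pyRange 1 (y + 1) 1).foldl (fun wynik _ => wynik * x) 1

-- A's string concatenation 'wynik + p' is ported over List Char (String.mk at the end).
def SUMAS (s1 : String) (s2 : String) : String :=
  let suma1 : Int := (PySem.List.pyRange 0 (PySem.Str.len s1) 1).foldl
    (fun suma1 i =>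
      suma1 + wartosc_litery (PySem.List.pyGetD s1.toList i 'a') * potegi 10 (PySem.Str.len s1 - i - 1)) 0
  let suma2 : Int := (PySem.List.pyRange 0 (PySem.Str.len s2) 1).foldl
    (fun suma2 j =>
      suma2 + wartosc_litery (PySem.List.pyGetD s2.toList j 'a') * potegi 10 (PySem.Str.len s2 - j - 1)) 0
  let suma : Int := suma1 + suma2
  let k : String := PySem.Int.toStr suma
  let wynik : List Char := (PySem.List.pyRange 0 (PySem.Str.len k) 1).foldl
    (fun wynik i => wynik ++ [wartosc_cyfry (PySem.List.pyGetD k.toList i '0')]) []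
  String.mk wynik

-- ===== PORT B =====
def pvAlphabet : List Char := "abcdefghij".toList

-- Python's ALPHABET.index(c) raises ValueError outside 'a'..'j' (excluded by Pre_SUMAS);
-- the .getD 0 default stands for that dead branch.
def SUMAS_alt (s1 : String) (s2 : String) : String :=
  let n1 : Int := s1.toList.foldl
    (fun n c => 10 * n + (((PySem.List.index? pvAlphabet c).getD 0 : Nat) : Int)) 0
  let n2 : Int := s2.toList.foldl
    (fun n c => 10 * n + (((PySem.List.index? pvAlphabet c).getD 0 : Nat) : Int)) 0
  String.mk ((PySem.Int.toChars (n1 + n2)).map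
    (fun d => PySem.List.pyGetD pvAlphabet ((d.toNat : Int) - 48) 'a'))

-- ===== PRECONDITION & SPEC =====
-- Pre_: every character of both strings is one of 'a'..'j' (codes 97..106); on any other
-- character Python's wartosc_litery returns None and SUMAS raises TypeError (None * int).
def Pre_SUMAS (s1 : String) (s2 : String) : Prop :=
  (s1.toList.all (fun c => 97 ≤ c.toNat && c.toNat ≤ 106)
    && s2.toList.all (fun c => 97 ≤ c.toNat && c.toNat ≤ 106)) = true
instance (s1 : String) (s2 : String) : Decidable (Pre_SUMAS s1 s2) := by
  unfold Pre_SUMAS; infer_instance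

def pvWitness_SUMAS : String × String := ("bcdejjihgfa", "jihgfedcbaj")

def Spec_SUMAS (s1 : String) (s2 : String) (out : String) : Prop := out = SUMAS_alt s1 s2
instance (s1 : String) (s2 : String) (out : String) : Decidable (Spec_SUMAS s1 s2 out) := by
  unfold Spec_SUMAS; infer_instance

-- ===== CLAIM (what is proved, stated in full; the proofs are below) =====
def Claim_equal_SUMAS : Prop := ∀ (s1 : String) (s2 : String),
  Dom_SUMAS s1 s2 → Pre_SUMAS s1 s2 → Spec_SUMAS s1 s2 (SUMAS s1 s2)

-- ===== LEMMAS AND PROOFS =====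

-- letters 'a'..'j': A's if-chain equals ord-arithmetic
theorem wartosc_litery_eq (c : Char) (h1 : 97 ≤ c.toNat) (h2 : c.toNat ≤ 106) :
    wartosc_litery c = (c.toNat : Int) - 97 := by
  have hc : Char.ofNat c.toNat = c := Char.ofNat_toNat c
  rw [← hc]
  interval_cases h : c.toNat <;> decide

-- letters 'a'..'j': B's alphabet position equals ord-arithmetic
theorem index_alphabet_eq (c : Char) (h1 : 97 ≤ c.toNat) (h2 : c.toNat ≤ 106) :
    (((PySem.List.index? pvAlphabet c).getD 0 : Nat) : Int) = (c.toNat : Int) - 97 := by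
  have hc : Char.ofNat c.toNat = c := Char.ofNat_toNat c
  rw [← hc]
  interval_cases h : c.toNat <;> decide

-- digits '0'..'9': A's if-chain equals B's alphabet lookup
theorem wartosc_cyfry_eq (c : Char) (h1 : 48 ≤ c.toNat) (h2 : c.toNat ≤ 57) :
    wartosc_cyfry c = PySem.List.pyGetD pvAlphabet ((c.toNat : Int) - 48) 'a' := by
  have hc : Char.ofNat c.toNat = c := Char.ofNat_toNat c
  rw [← hc]
  interval_cases h : c.toNat <;> decide

theorem foldl_mul_const (x a : Int) (l : List Int) :
    l.foldl (fun w _ => w * x) a = a * x ^ l.length := by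
  induction l generalizing a with
  | nil => simp
  | cons b l ih => simp [List.foldl_cons, ih, pow_succ]; ring

theorem potegi_eq (k : Nat) : potegi 10 (k : Int) = 10 ^ k := by
  unfold potegi
  rw [foldl_mul_const, PySem.List.length_pyRange_one]
  simp

-- the indexed power-sum of A equals a sum over positions
theorem parse_eq (cs : List Char) :
    (PySem.List.pyRange 0 (cs.length : Int) 1).foldl
      (fun acc i =>
        acc + wartosc_litery (PySem.List.pyGetD cs i 'a') * potegi 10 ((cs.length : Int) - i - 1)) 0
    = ((List.range cs.length).map
        (fun j => wartosc_litery (cs.getD j 'a') * 10 ^ (cs.length - 1 - j))).sum := by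
  rw [PySem.List.pyRange_zero_natCast, List.foldl_map, PySem.List.foldl_add]
  simp only [zero_add]
  congr 1
  apply List.map_congr_left
  intro j hj
  rw [List.mem_range] at hj
  have h1 : PySem.List.pyGetD cs (j : Int) 'a' = cs.getD j 'a' := PySem.List.pyGetD_natCast cs j 'a'
  have h2 : ((cs.length : Int) - (j : Int) - 1) = ((cs.length - 1 - j : Nat) : Int) := by
    omega
  rw [h1, h2, potegi_eq]

-- and that sum equals the plain ord-arithmetic Horner fold
theorem sum_eq_horner (cs : List Char)
    (h : ∀ c ∈ cs, 97 ≤ c.toNat ∧ c.toNat ≤ 106) :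
    ((List.range cs.length).map
        (fun j => wartosc_litery (cs.getD j 'a') * 10 ^ (cs.length - 1 - j))).sum
    = cs.foldl (fun n c => 10 * n + ((c.toNat : Int) - 97)) 0 := by
  induction cs using List.reverseRecOn with
  | nil => simp
  | append_singleton cs c ih =>
    have hmem : ∀ d ∈ cs, 97 ≤ d.toNat ∧ d.toNat ≤ 106 := by
      intro d hd; exact h d (List.mem_append_left _ hd)
    have hc := h c (List.mem_append_right _ (List.mem_singleton_self c))
    rw [List.length_append, List.length_singleton, List.range_succ, List.map_append,
        List.sum_append, List.foldl_append]
    have hlast : ((cs ++ [c]).getD cs.length 'a') = c := by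
      simp [List.getD_eq_getElem?_getD]
    have hstep : ((List.range cs.length).map
        (fun j => wartosc_litery ((cs ++ [c]).getD j 'a') * 10 ^ (cs.length + 1 - 1 - j))).sum
        = 10 * ((List.range cs.length).map
            (fun j => wartosc_litery (cs.getD j 'a') * 10 ^ (cs.length - 1 - j))).sum := by
      rw [← List.sum_map_mul_left]
      apply congrArg
      apply List.map_congr_left
      intro j hj
      rw [List.mem_range] at hj
      have hg : (cs ++ [c]).getD j 'a' = cs.getD j 'a' := by
        simp [List.getD_eq_getElem?_getD, List.getElem?_append_left hj]
      have hp : (10 : Int) ^ (cs.length + 1 - 1 - j) = 10 * 10 ^ (cs.length - 1 - j) := by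
        have : cs.length + 1 - 1 - j = (cs.length - 1 - j) + 1 := by omega
        rw [this, pow_succ]; ring
      rw [hg, hp]; ring
    rw [hstep, ih hmem]
    simp only [List.map_cons, List.map_nil, List.sum_cons, List.sum_nil, List.foldl_cons,
      List.foldl_nil, hlast]
    rw [wartosc_litery_eq c hc.1 hc.2]
    have hz : cs.length + 1 - 1 - cs.length = 0 := by omega
    rw [hz]
    ring

-- B's index?-fold is the same ord-arithmetic Horner fold on 'a'..'j' strings
theorem alt_fold_eq (cs : List Char)
    (h : ∀ c ∈ cs, 97 ≤ c.toNat ∧ c.toNat ≤ 106) :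
    cs.foldl (fun n c => 10 * n + (((PySem.List.index? pvAlphabet c).getD 0 : Nat) : Int)) 0
    = cs.foldl (fun n c => 10 * n + ((c.toNat : Int) - 97)) 0 := by
  apply PySem.List.foldl_congr_mem
  intro acc c hcmem
  rw [index_alphabet_eq c (h c hcmem).1 (h c hcmem).2]

-- Horner value is nonnegative on 'a'..'j' strings
theorem horner_nonneg (cs : List Char) (h : ∀ c ∈ cs, 97 ≤ c.toNat)
    (a : Int) (ha : 0 ≤ a) :
    0 ≤ cs.foldl (fun n c => 10 * n + ((c.toNat : Int) - 97)) a := by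
  induction cs generalizing a with
  | nil => simpa
  | cons c cs ih =>
    rw [List.foldl_cons]
    refine ih (fun d hd => h d (List.mem_cons_of_mem _ hd)) _ ?_
    have := h c List.mem_cons_self
    have : (97 : Int) ≤ (c.toNat : Int) := by exact_mod_cast this
    omega

-- every character of Nat.toDigits 10 m is a decimal digit
theorem toDigitsCore_digits (f : Nat) : ∀ (m : Nat) (acc : List Char),
    (∀ c ∈ acc, 48 ≤ c.toNat ∧ c.toNat ≤ 57) →
    ∀ c ∈ Nat.toDigitsCore 10 f m acc, 48 ≤ c.toNat ∧ c.toNat ≤ 57 := by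
  induction f with
  | zero => intro m acc hacc c hc; exact hacc c hc
  | succ f ih =>
    intro m acc hacc c hc
    have hd : 48 ≤ (Nat.digitChar (m % 10)).toNat ∧ (Nat.digitChar (m % 10)).toNat ≤ 57 := by
      have : m % 10 < 10 := Nat.mod_lt _ (by omega)
      interval_cases h : m % 10 <;> decide
    simp only [Nat.toDigitsCore] at hc
    split at hc
    · rcases List.mem_cons.mp hc with h | h
      · subst h; exact hd
      · exact hacc c h
    · refine ih (m / 10) _ ?_ c hc
      intro d hdm
      rcases List.mem_cons.mp hdm with h | h
      · subst h; exact hd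
      · exact hacc d h

theorem toChars_digits (n : Int) (hn : 0 ≤ n) :
    ∀ c ∈ PySem.Int.toChars n, 48 ≤ c.toNat ∧ c.toNat ≤ 57 := by
  unfold PySem.Int.toChars
  rw [if_neg (by omega)]
  exact toDigitsCore_digits _ _ [] (by simp)

-- A's final loop builds B's alphabet-lookup map over the digit string
theorem encode_eq (n : Int) (hn : 0 ≤ n) :
    (PySem.List.pyRange 0 (PySem.Str.len (PySem.Int.toStr n)) 1).foldl
      (fun wynik i =>
        wynik ++ [wartosc_cyfry (PySem.List.pyGetD (PySem.Int.toStr n).toList i '0')]) []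
    = (PySem.Int.toChars n).map
        (fun d => PySem.List.pyGetD pvAlphabet ((d.toNat : Int) - 48) 'a') := by
  have hlen : PySem.Str.len (PySem.Int.toStr n) = PySem.List.len (PySem.Int.toStr n).toList := by
    simp [PySem.Str.len_eq, PySem.List.len_eq]
  rw [hlen,
    PySem.List.foldl_pyRange_zero_pyGetD (PySem.Int.toStr n).toList '0'
      (fun acc c => acc ++ [wartosc_cyfry c]) [],
    PySem.List.foldl_append_singleton_eq_map, List.nil_append, PySem.Int.toList_toStr]
  apply List.map_congr_left
  intro c hc
  have := toChars_digits n hn c hc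
  exact wartosc_cyfry_eq c this.1 this.2

-- ===== VERDICT (by name: the statement is the Claim_ definition above) =====
theorem SUMAS_spec : Claim_equal_SUMAS := by
  intro s1 s2 _hdom hpre
  unfold Pre_SUMAS at hpre
  rw [Bool.and_eq_true, List.all_eq_true, List.all_eq_true] at hpre
  obtain ⟨h1, h2⟩ := hpre
  have h1' : ∀ c ∈ s1.toList, 97 ≤ c.toNat ∧ c.toNat ≤ 106 := by
    intro c hc; have := h1 c hc; simp at this; exact this
  have h2' : ∀ c ∈ s2.toList, 97 ≤ c.toNat ∧ c.toNat ≤ 106 := by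
    intro c hc; have := h2 c hc; simp at this; exact this
  unfold Spec_SUMAS SUMAS SUMAS_alt
  dsimp only
  have hl1 : PySem.Str.len s1 = (s1.toList.length : Int) := by simp [PySem.Str.len_eq]
  have hl2 : PySem.Str.len s2 = (s2.toList.length : Int) := by simp [PySem.Str.len_eq]
  rw [hl1, hl2, parse_eq, parse_eq, sum_eq_horner s1.toList h1', sum_eq_horner s2.toList h2',
    alt_fold_eq s1.toList h1', alt_fold_eq s2.toList h2']
  have hnn : 0 ≤ s1.toList.foldl (fun n c => 10 * n + ((c.toNat : Int) - 97)) 0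
      + s2.toList.foldl (fun n c => 10 * n + ((c.toNat : Int) - 97)) 0 := by
    have a1 := horner_nonneg s1.toList (fun c hc => (h1' c hc).1) 0 le_rfl
    have a2 := horner_nonneg s2.toList (fun c hc => (h2' c hc).1) 0 le_rfl
    omega
  rw [encode_eq _ hnn]
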